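-- pv_equiv track=rewrite | github.com/kookin93/pay-calculator | app.py | vlookup_approx
-- ===== SOURCE A (Python) =====
-- import bisect
--
-- def vlookup_approx(monthly_taxable: int, family_count: int, table_rows: list) -> int:
--     """
--     엑셀
--     VLOOKUP(AF20, 간이세액표!A5:M651, (2+AR20), 1)
--     family_count는 1~11
--     """
--     if family_count < 1:
--         family_count = 1
--     if family_count > 11:
--         family_count = 11
--
--     lows = [r[0] for r in table_rows]
--     idx = bisect.bisect_right(lows, monthly_taxable) - 1
--     if idx < 0:
--         raise KeyError("table underflow")
--
--     low, high, vals = table_rows[idx]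
--     return int(vals[family_count - 1])
-- ===== SOURCE B (Python) =====
-- def vlookup_approx(monthly_taxable: int, family_count: int, table_rows: list) -> int:
--     fc = min(max(family_count, 1), 11)
--     vals = None
--     for row in table_rows:
--         if row[0] > monthly_taxable:
--             break
--         vals = row[2]
--     if vals is None:
--         raise KeyError("table underflow")
--     return int(vals[fc - 1])
-- ===== Notes on version B (the rewrite author's own statement) =====
-- stated objective: alternative
-- what changed: B replaces the bisect binary search over an extracted key list with a single forward scan that keeps the last row whose key is <= the lookup value and breaks at the first larger key; Pre_ keeps tables sorted by first column (the Excel-VLOOKUP contract this code mimics) or with all keys <= the lookup value, and excludes other unsorted tables, where A's bisect result is a probe-order accident.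
-- outside the precondition, e.g. on vlookup_approx(5, 1, [(10, 0, [1]), (0, 0, [2])]): A returns 2, B raises KeyError
import Mathlib
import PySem

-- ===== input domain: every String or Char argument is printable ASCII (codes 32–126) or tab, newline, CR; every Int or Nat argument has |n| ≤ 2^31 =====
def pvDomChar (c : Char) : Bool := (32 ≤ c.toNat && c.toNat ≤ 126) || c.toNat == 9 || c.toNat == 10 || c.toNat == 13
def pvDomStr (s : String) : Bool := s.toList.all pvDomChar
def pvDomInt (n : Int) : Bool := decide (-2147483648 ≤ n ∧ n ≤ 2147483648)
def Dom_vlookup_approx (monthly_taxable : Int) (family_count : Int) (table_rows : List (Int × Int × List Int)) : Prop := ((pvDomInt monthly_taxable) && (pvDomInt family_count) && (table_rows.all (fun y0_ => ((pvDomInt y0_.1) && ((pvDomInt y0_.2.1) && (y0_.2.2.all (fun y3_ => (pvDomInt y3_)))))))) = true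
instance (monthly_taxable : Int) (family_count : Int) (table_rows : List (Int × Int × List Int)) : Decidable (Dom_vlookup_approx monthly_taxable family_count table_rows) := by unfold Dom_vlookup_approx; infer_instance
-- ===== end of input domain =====

-- B replaces A's bisect over an extracted key list by a single forward scan keeping the last
-- row whose key <= the lookup value; Pre_ requires the table sorted by first column (the
-- Excel-VLOOKUP contract this code mimics), where the two agree.


-- ===== PORT A =====
-- Literal port of A: clamp family_count by two ifs, build the list of first columns,
-- bisect.bisect_right on it (= PySem.List.bisectRight), then index the selected row.
-- On A's raise paths (KeyError "table underflow"; IndexError on vals) the port returns 0; Pre_ excludes them.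
def vlookup_approx (monthly_taxable : Int) (family_count : Int) (table_rows : List (Int × Int × List Int)) : Int :=
  let fc1 := if family_count < 1 then 1 else family_count
  let fc2 := if fc1 > 11 then 11 else fc1
  let lows := table_rows.map (fun r => r.1)
  let idx := PySem.List.bisectRight lows monthly_taxable
  if idx = 0 then 0
  else
    let row := table_rows.getD (idx - 1) (0, 0, [])
    (PySem.List.pyGet? row.2.2 (fc2 - 1)).getD 0

-- ===== PORT B =====
-- Port of B's for-loop with break: scanRows walks the rows, keeps the last vals whose key ≤ x,
-- and stops at the first key > x (the Python `break`).  `none` = Python's vals is None (KeyError path;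
-- port returns 0 there; Pre_ excludes it).
def scanRows (x : Int) : List (Int × Int × List Int) → Option (List Int) → Option (List Int)
  | [], acc => acc
  | r :: rest, acc => if x < r.1 then acc else scanRows x rest (some r.2.2)

def vlookup_approx_alt (monthly_taxable : Int) (family_count : Int) (table_rows : List (Int × Int × List Int)) : Int :=
  let fc := min (max family_count 1) 11
  match scanRows monthly_taxable table_rows none with
  | none => 0
  | some vals => (PySem.List.pyGet? vals (fc - 1)).getD 0

-- ===== PRECONDITION & SPEC =====
-- Pre_ requires (a) the table sorted (non-decreasing) by first column — the Excel-VLOOKUP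
-- approximate-match contract — OR all keys ≤ the lookup value (then the match is the last row
-- regardless of order); on other unsorted tables A's bisect result is a probe-order accident and
-- B's sequential result is equally defensible, so those are excluded — and (b) A's two raise
-- conditions: some row key ≤ monthly_taxable (else KeyError "table underflow") and the matched
-- row's vals long enough for the clamped family_count (else IndexError).
def Pre_vlookup_approx (monthly_taxable : Int) (family_count : Int) (table_rows : List (Int × Int × List Int)) : Prop :=
  (List.Pairwise (fun a b => a.1 ≤ b.1) table_rows ∨ ∀ r ∈ table_rows, r.1 ≤ monthly_taxable) ∧
  table_rows.filter (fun r => decide (r.1 ≤ monthly_taxable)) ≠ [] ∧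
  min (max family_count 1) 11 ≤
    (((table_rows.filter (fun r => decide (r.1 ≤ monthly_taxable))).getLastD (0, 0, [])).2.2.length : Int)
instance (monthly_taxable : Int) (family_count : Int) (table_rows : List (Int × Int × List Int)) : Decidable (Pre_vlookup_approx monthly_taxable family_count table_rows) := by unfold Pre_vlookup_approx; infer_instance

def pvWitness_vlookup_approx : Int × Int × (List (Int × Int × List Int)) :=
  (1500, 3, [(0, 999, [1, 2, 3]), (1000, 1999, [4, 5, 6]), (2000, 2999, [7, 8, 9])])

def Spec_vlookup_approx (monthly_taxable : Int) (family_count : Int) (table_rows : List (Int × Int × List Int)) (out : Int) : Prop := out = vlookup_approx_alt monthly_taxable family_count table_rows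
instance (monthly_taxable : Int) (family_count : Int) (table_rows : List (Int × Int × List Int)) (out : Int) : Decidable (Spec_vlookup_approx monthly_taxable family_count table_rows out) := by unfold Spec_vlookup_approx; infer_instance

-- ===== CLAIM =====
def Claim_equal_vlookup_approx : Prop := ∀ (monthly_taxable : Int) (family_count : Int) (table_rows : List (Int × Int × List Int)), Dom_vlookup_approx monthly_taxable family_count table_rows → Pre_vlookup_approx monthly_taxable family_count table_rows → Spec_vlookup_approx monthly_taxable family_count table_rows (vlookup_approx monthly_taxable family_count table_rows)

-- ===== LEMMAS AND PROOFS =====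

-- A's two-step clamp equals B's min/max clamp.
lemma clamp_eq (fc : Int) :
    (if (if fc < 1 then 1 else fc) > 11 then 11 else (if fc < 1 then 1 else fc)) = min (max fc 1) 11 := by
  split_ifs <;> omega

-- On a table sorted by key, filtering `key ≤ x` is taking the initial segment with `key ≤ x`.
lemma filter_eq_takeWhile (x : Int) (rows : List (Int × Int × List Int))
    (hs : List.Pairwise (fun a b => a.1 ≤ b.1) rows) :
    rows.filter (fun r => decide (r.1 ≤ x)) = rows.takeWhile (fun r => decide (r.1 ≤ x)) := by
  induction rows with
  | nil => rfl
  | cons a l ih =>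
    rcases List.pairwise_cons.mp hs with ⟨ha, hl⟩
    by_cases h : a.1 ≤ x
    · simp [h, ih hl]
    · have : l.filter (fun r => decide (r.1 ≤ x)) = [] := by
        rw [List.filter_eq_nil_iff]
        intro b hb
        have := ha b hb
        simpa using by omega
      simp [h, this]

-- On a sorted key list, bisect_right returns the length of the initial segment ≤ x.
lemma bisectRight_eq_takeWhile_length (x : Int) (l : List Int)
    (hs : List.Pairwise (fun a b => a ≤ b) l) :
    PySem.List.bisectRight l x = (l.takeWhile (fun a => decide (a ≤ x))).length := by
  obtain ⟨hle, hlow, hhigh⟩ := PySem.List.bisectRight_spec l x hs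
  have htle : (l.takeWhile (fun a => decide (a ≤ x))).length ≤ l.length :=
    (List.takeWhile_prefix _).length_le
  have ht_elem : ∀ i (hi : i < (l.takeWhile (fun a => decide (a ≤ x))).length),
      l[i]'(lt_of_lt_of_le hi htle) ≤ x := by
    intro i hi
    have hmem := List.mem_takeWhile_imp (List.getElem_mem hi)
    have heq := (List.takeWhile_prefix (l := l) (fun a => decide (a ≤ x))).getElem hi
    rw [heq] at hmem
    simpa using hmem
  have ht_bound : ∀ (h : (l.takeWhile (fun a => decide (a ≤ x))).length < l.length),
      x < l[(l.takeWhile (fun a => decide (a ≤ x))).length] := by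
    intro h
    set t := l.takeWhile (fun a => decide (a ≤ x)) with ht
    set d := l.dropWhile (fun a => decide (a ≤ x)) with hd
    have hsplit : t ++ d = l := List.takeWhile_append_dropWhile
    have hlensum : t.length + d.length = l.length := by
      have h2 := congrArg List.length hsplit
      simpa using h2
    have hdlen : 0 < d.length := by omega
    have hget : l[t.length]? = d[0]? := by
      conv_lhs => rw [← hsplit]
      rw [List.getElem?_append_right (le_refl _)]
      simp
    rw [List.getElem?_eq_getElem h, List.getElem?_eq_getElem hdlen] at hget
    have hgete : l[t.length]'h = d[0]'hdlen := by
      exact Option.some.inj hget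
    have hhd := List.head?_dropWhile_not (fun a => decide (a ≤ x)) l
    rw [← hd, List.head?_eq_getElem?, List.getElem?_eq_getElem hdlen] at hhd
    simp at hhd
    rw [hgete]
    omega
  rcases Nat.lt_trichotomy (PySem.List.bisectRight l x) (l.takeWhile (fun a => decide (a ≤ x))).length with hlt | heq | hgt
  · have h1 := ht_elem _ hlt
    have h2 := hhigh _ (lt_of_lt_of_le hlt htle) (le_refl _)
    omega
  · exact heq
  · have h1 := hlow _ (lt_of_lt_of_le hgt hle) hgt
    have h2 := ht_bound (lt_of_lt_of_le hgt hle)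
    omega

-- B's scan computes the last element of the initial segment with key ≤ x.
lemma scanRows_eq_getLast (x : Int) (rows : List (Int × Int × List Int))
    (hs : List.Pairwise (fun a b => a.1 ≤ b.1) rows) :
    ∀ acc, scanRows x rows acc =
      match (rows.takeWhile (fun r => decide (r.1 ≤ x))).getLast? with
      | none => acc
      | some r => some r.2.2 := by
  induction rows with
  | nil => intro acc; simp [scanRows]
  | cons a l ih =>
    intro acc
    rcases List.pairwise_cons.mp hs with ⟨_, hl⟩
    by_cases h : x < a.1
    · have hda : decide (a.1 ≤ x) = false := by simpa using by omega
      simp [scanRows, hda, if_pos h]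
    · have hda : decide (a.1 ≤ x) = true := by simpa using by omega
      rw [scanRows, if_neg h, ih hl (some a.2.2), List.takeWhile_cons, hda]
      cases h' : (l.takeWhile (fun r => decide (r.1 ≤ x))).getLast? with
      | none => simp [List.getLast?_cons, h']
      | some r => simp [List.getLast?_cons, h']

-- If every probed element is ≤ x, the bisect loop always moves lo up and ends at hi.
lemma bisectRightLoop_all_le (x : Int) (l : List Int) (hall : ∀ a ∈ l, a ≤ x) :
    ∀ (fuel lo hi : Nat), hi ≤ l.length → hi - lo ≤ fuel → lo ≤ hi →
      PySem.List.bisectRightLoop l x fuel lo hi = hi := by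
  intro fuel
  induction fuel with
  | zero =>
    intro lo hi _ hf hlh
    rw [PySem.List.bisectRightLoop]
    omega
  | succ n ih =>
    intro lo hi hhi hf hlh
    rw [PySem.List.bisectRightLoop]
    by_cases h : lo < hi
    · rw [if_pos h]
      have hmid : (lo + hi) / 2 < l.length := by omega
      rw [List.getElem?_eq_getElem hmid]
      dsimp only
      have hle := hall _ (List.getElem_mem hmid)
      rw [if_neg (by omega)]
      exact ih ((lo + hi) / 2 + 1) hi hhi (by omega) (by omega)
    · rw [if_neg h]; omega

lemma bisectRight_all_le (x : Int) (l : List Int) (hall : ∀ a ∈ l, a ≤ x) :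
    PySem.List.bisectRight l x = l.length := by
  rw [PySem.List.bisectRight]
  exact bisectRightLoop_all_le x l hall l.length 0 l.length le_rfl (by omega) (by omega)

-- If every key is ≤ x the scan never breaks and keeps the last row's vals.
lemma scanRows_all_le (x : Int) (rows : List (Int × Int × List Int))
    (hall : ∀ r ∈ rows, r.1 ≤ x) :
    ∀ acc, scanRows x rows acc =
      match rows.getLast? with
      | none => acc
      | some r => some r.2.2 := by
  induction rows with
  | nil => intro acc; simp [scanRows]
  | cons a l ih =>
    intro acc
    have ha := hall a (List.mem_cons_self)
    rw [scanRows, if_neg (by omega), ih (fun r hr => hall r (List.mem_cons_of_mem a hr)) (some a.2.2)]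
    cases h' : l.getLast? with
    | none => simp [List.getLast?_cons, h']
    | some r => simp [List.getLast?_cons, h']

theorem vlookup_approx_spec : Claim_equal_vlookup_approx := by
  intro x fc rows _ hpre
  obtain ⟨hsortall, hne, _⟩ := hpre
  unfold Spec_vlookup_approx vlookup_approx vlookup_approx_alt
  rcases hsortall with hsort | hall
  case inr =>
    -- every key ≤ x: both return the last row's value
    have hrne : rows ≠ [] := by
      intro h0; rw [h0] at hne; exact hne rfl
    have hlpos : 0 < rows.length := List.length_pos_iff.mpr hrne
    have hidx : PySem.List.bisectRight (rows.map (fun r => r.1)) x = rows.length := by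
      rw [bisectRight_all_le]
      · simp
      · intro a ha
        obtain ⟨r, hr, rfl⟩ := List.mem_map.mp ha
        exact hall r hr
    have hscan : scanRows x rows none = some ((rows.getLast hrne).2.2) := by
      rw [scanRows_all_le x rows hall none, List.getLast?_eq_some_getLast hrne]
    have hrow : rows.getD (rows.length - 1) (0, 0, []) = rows.getLast hrne := by
      rw [List.getLast_eq_getElem, List.getD_eq_getElem rows _ (by omega)]
    simp only [hidx, hscan, clamp_eq]
    rw [if_neg (show ¬ rows.length = 0 by omega), hrow]
  -- sorted table: A's bisect index is the length of the initial segment with key ≤ x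
  set t := rows.takeWhile (fun r => decide (r.1 ≤ x)) with hts
  have htne : t ≠ [] := by rw [hts, ← filter_eq_takeWhile x rows hsort]; exact hne
  have hkpos : 0 < t.length := List.length_pos_iff.mpr htne
  have hkle : t.length ≤ rows.length := (List.takeWhile_prefix _).length_le
  have hsortK : List.Pairwise (fun a b => a ≤ b) (rows.map (fun r => r.1)) := by
    rw [List.pairwise_map]; exact hsort
  have hidx : PySem.List.bisectRight (rows.map (fun r => r.1)) x = t.length := by
    rw [bisectRight_eq_takeWhile_length x _ hsortK, List.takeWhile_map, hts]
    simp [Function.comp_def]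
  -- A's selected row is the last element of t
  have hrow : rows.getD (t.length - 1) (0, 0, []) = t.getLast htne := by
    have h1 : t.length - 1 < t.length := by omega
    rw [List.getLast_eq_getElem, (List.takeWhile_prefix _).getElem h1,
      List.getD_eq_getElem rows _ (by omega)]
    rfl
  -- B's scan returns the last element of t
  have hscan : scanRows x rows none = some ((t.getLast htne).2.2) := by
    rw [scanRows_eq_getLast x rows hsort none, ← hts,
      List.getLast?_eq_some_getLast htne]
  simp only [hidx, hscan, clamp_eq]
  rw [if_neg (show ¬ t.length = 0 by omega), hrow]
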